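-- pv_equiv track=rewrite | github.com/jtreeves/matrix_regression | matrices/columns.py | columns_3d
-- ===== SOURCE A (Python) =====
-- def columns_3d(matrix):
--     column_one = []
--     column_two = []
--     column_three = []
--     for row in matrix:
--         column_one.append(row[0])
--         column_two.append(row[1])
--         column_three.append(row[2])
--     return [column_one, column_two, column_three]
-- ===== SOURCE B (Python) =====
-- def columns_3d(matrix):
--     return [[row[i] for row in matrix] for i in range(3)]
-- ===== Notes on version B (the rewrite author's own statement) =====
-- stated objective: simpler
-- what changed: B walks column indices 0..2 in the outer loop and the matrix rows in the inner loop (three column-major passes as one nested comprehension) instead of A's single row-major pass maintaining three accumulator lists.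
import Mathlib
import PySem

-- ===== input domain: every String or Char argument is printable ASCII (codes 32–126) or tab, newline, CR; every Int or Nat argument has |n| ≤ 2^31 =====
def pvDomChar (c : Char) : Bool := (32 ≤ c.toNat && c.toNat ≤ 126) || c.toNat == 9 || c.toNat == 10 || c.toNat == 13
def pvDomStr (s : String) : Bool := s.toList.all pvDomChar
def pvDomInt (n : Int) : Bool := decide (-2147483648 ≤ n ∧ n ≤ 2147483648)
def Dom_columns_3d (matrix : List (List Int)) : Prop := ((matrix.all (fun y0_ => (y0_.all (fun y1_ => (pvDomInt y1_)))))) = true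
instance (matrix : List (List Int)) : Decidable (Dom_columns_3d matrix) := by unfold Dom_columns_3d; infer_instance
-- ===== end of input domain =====

-- B extracts the first three columns column-by-column (three column-major passes)
-- instead of A's single row-major pass with three accumulators; same result on Pre_.

-- ===== PORT A =====
-- for row in matrix: append row[0], row[1], row[2] to the three accumulators
def columns_3d (matrix : List (List Int)) : List (List Int) :=
  let st := matrix.foldl
    (fun (st : List Int × List Int × List Int) row =>
      (st.1 ++ [PySem.List.pyGetD row 0 0],
       st.2.1 ++ [PySem.List.pyGetD row 1 0],
       st.2.2 ++ [PySem.List.pyGetD row 2 0]))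
    ([], [], [])
  [st.1, st.2.1, st.2.2]

-- ===== PORT B =====
-- [[row[i] for row in matrix] for i in range(3)]
def columns_3d_alt (matrix : List (List Int)) : List (List Int) :=
  (PySem.List.pyRange 0 3 1).map (fun i => matrix.map (fun row => PySem.List.pyGetD row i 0))

-- ===== PRECONDITION & SPEC =====
-- Pre_ excludes matrices with a row of fewer than 3 entries, where A raises IndexError.
def Pre_columns_3d (matrix : List (List Int)) : Prop :=
  ∀ row ∈ matrix, 3 ≤ row.length
instance (matrix : List (List Int)) : Decidable (Pre_columns_3d matrix) := by unfold Pre_columns_3d; infer_instance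
def pvWitness_columns_3d : List (List Int) := [[1, 2, 3], [4, 5, 6, 7]]
def Spec_columns_3d (matrix : List (List Int)) (out : List (List Int)) : Prop := out = columns_3d_alt matrix
instance (matrix : List (List Int)) (out : List (List Int)) : Decidable (Spec_columns_3d matrix out) := by unfold Spec_columns_3d; infer_instance

-- ===== CLAIM (what is proved, stated in full; the proofs are below) =====
def Claim_equal_columns_3d : Prop := ∀ (matrix : List (List Int)), Dom_columns_3d matrix → Pre_columns_3d matrix → Spec_columns_3d matrix (columns_3d matrix)

-- ===== LEMMAS AND PROOFS =====

theorem columns_3d_foldl (matrix : List (List Int)) (a b c : List Int) :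
    matrix.foldl
      (fun (st : List Int × List Int × List Int) row =>
        (st.1 ++ [PySem.List.pyGetD row 0 0],
         st.2.1 ++ [PySem.List.pyGetD row 1 0],
         st.2.2 ++ [PySem.List.pyGetD row 2 0]))
      (a, b, c) =
    (a ++ matrix.map (fun row => PySem.List.pyGetD row 0 0),
     b ++ matrix.map (fun row => PySem.List.pyGetD row 1 0),
     c ++ matrix.map (fun row => PySem.List.pyGetD row 2 0)) := by
  induction matrix generalizing a b c with
  | nil => simp
  | cons r rs ih => simp [List.foldl, ih]

-- ===== VERDICT (by name: the statement is the Claim_ definition above) =====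
theorem pyRange03 : PySem.List.pyRange 0 3 1 = [0, 1, 2] := by decide

theorem columns_3d_spec : Claim_equal_columns_3d := by
  intro matrix _ _
  unfold Spec_columns_3d columns_3d columns_3d_alt
  rw [columns_3d_foldl, pyRange03]
  simp
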